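-- pv_equiv track=rewrite | github.com/guswns3371/Algorithm | src/Codility/RectangleBuilderGreaterArea.py | solution
-- ===== SOURCE A (Python) =====
-- from collections import Counter
--
-- def solution(A, X):
--     answer = 0
--
--     # make available fence list
--     available = []
--     for k, v in Counter(A).items():
--         if v >= 4:
--             if k * k >= X:
--                 answer += 1
--             available.append(k)
--         elif v >= 2:
--             available.append(k)
--     available.sort()  # available 리스트에 두 개 만 고르면 직사각형이 만들어짐
--
--     left = 0
--     right = len(available) - 1
--     while left < right:
--         area = available[left] * available[right]
--         if area >= X:
--             answer += right - left  # right - left 값 자체가 경우의 수.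
--             right -= 1
--         else:
--             left += 1
--
--         if answer > 10 ** 9:
--             return -1
--
--     return answer
-- ===== SOURCE B (Python) =====
-- def solution(A, X):
--     # sort-then-scan run-length counting instead of a Counter; shrinking-list
--     # pair loop; single overflow check at the end
--     S = sorted(A)
--     n = len(S)
--     squares = 0
--     available = []
--     i = 0
--     while i < n:
--         j = i
--         while j < n and S[j] == S[i]:
--             j += 1
--         c = j - i
--         if c >= 2:
--             if c >= 4 and S[i] * S[i] >= X:
--                 squares += 1
--             available.append(S[i])
--         i = j
--     total = squares
--     while len(available) >= 2:
--         if available[0] * available[-1] >= X: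
--             total += len(available) - 1
--             available.pop()
--         else:
--             available.pop(0)
--     return -1 if total > 10 ** 9 else total
-- ===== Notes on version B (the rewrite author's own statement) =====
-- stated objective: alternative
-- what changed: Duplicate detection is done by sorting the input and scanning runs instead of building a Counter hash map, the pair loop shrinks a list from both ends instead of moving two index pointers, and the >10**9 overflow test is performed once at the end instead of inside every loop iteration (equivalent because the count only grows).
import Mathlib
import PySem

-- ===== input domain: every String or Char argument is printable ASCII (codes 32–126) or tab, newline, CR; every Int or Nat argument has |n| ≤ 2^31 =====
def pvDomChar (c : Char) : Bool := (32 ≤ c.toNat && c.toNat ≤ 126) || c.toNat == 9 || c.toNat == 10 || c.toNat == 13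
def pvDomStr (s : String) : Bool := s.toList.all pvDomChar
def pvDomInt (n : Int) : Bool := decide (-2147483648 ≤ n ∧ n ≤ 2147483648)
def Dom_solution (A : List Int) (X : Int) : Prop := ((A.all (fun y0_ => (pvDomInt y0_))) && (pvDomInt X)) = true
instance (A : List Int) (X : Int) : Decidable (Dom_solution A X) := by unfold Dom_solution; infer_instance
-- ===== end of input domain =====

-- B keeps A's return value everywhere but finds duplicated values by sort-and-run-scan
-- instead of a Counter, counts pairs by shrinking a list from both ends instead of two
-- index pointers, and checks the 10^9 cap once at the end (the count only grows).

-- ===== PORT A =====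
-- the two-pointer while loop of A; av[left]/av[right] are ported with pyGetD, exact here
-- because solution only calls it with 0 ≤ l and r < av.length (so Python never raises)
def pvLoopA (av : List Int) (X answer l r : Int) : Int :=
  if _h : l < r then
    if PySem.List.pyGetD av l 0 * PySem.List.pyGetD av r 0 ≥ X then
      if answer + (r - l) > 10 ^ 9 then -1
      else pvLoopA av X (answer + (r - l)) l (r - 1)
    else
      if answer > 10 ^ 9 then -1
      else pvLoopA av X answer (l + 1) r
  else answer
termination_by (r - l).toNat
decreasing_by all_goals omega

-- the body of A's items loop (state = (answer, available))
def pvStepA (X : Int) (s : Int × List Int) (kv : Int × Int) : Int × List Int :=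
  if kv.2 ≥ 4 then
    (if kv.1 * kv.1 ≥ X then (s.1 + 1, s.2 ++ [kv.1]) else (s.1, s.2 ++ [kv.1]))
  else if kv.2 ≥ 2 then (s.1, s.2 ++ [kv.1])
  else s

def solution (A : List Int) (X : Int) : Int :=
  -- for k, v in Counter(A).items(): …  (fold over the items list, state = (answer, available))
  let p := (PySem.Dict.counter A).items.foldl (pvStepA X) ((0 : Int), ([] : List Int))
  let available := PySem.List.sorted p.2 id
  pvLoopA available X p.1 0 ((available.length : Int) - 1)

-- ===== PORT B =====
-- B's first while loop: scan runs of the sorted list (inner while = span on equality),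
-- state = (squares, available)
def pvScanRuns (X sq : Int) (av : List Int) : List Int → Int × List Int
  | [] => (sq, av)
  | x :: rest =>
    let run := rest.takeWhile (fun y => y == x)
    let rest' := rest.dropWhile (fun y => y == x)
    let c : Nat := run.length + 1
    if 2 ≤ c then
      if 4 ≤ c ∧ x * x ≥ X then pvScanRuns X (sq + 1) (av ++ [x]) rest'
      else pvScanRuns X sq (av ++ [x]) rest'
    else pvScanRuns X sq av rest'
termination_by S => S.length
decreasing_by all_goals
  have := List.length_dropWhile_le (fun y => y == x) rest
  simp only [List.length_cons]
  omega

-- B's second while loop: shrink available from both ends; av[0]/av[-1] ported with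
-- pyGetD, exact here because the guard gives 2 ≤ av.length (Python never raises)
def pvPairLoop (X total : Int) (av : List Int) : Int :=
  if _h : 2 ≤ av.length then
    if PySem.List.pyGetD av 0 0 * PySem.List.pyGetD av (-1) 0 ≥ X then
      pvPairLoop X (total + ((av.length : Int) - 1)) av.dropLast
    else pvPairLoop X total av.tail
  else total
termination_by av.length
decreasing_by all_goals simp [List.length_dropLast, List.length_tail]; omega

def solution_alt (A : List Int) (X : Int) : Int :=
  let S := PySem.List.sorted A id
  let p := pvScanRuns X 0 [] S
  let total := pvPairLoop X p.1 p.2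
  if total > 10 ^ 9 then -1 else total

-- ===== PRECONDITION & SPEC =====
def Spec_solution (A : List Int) (X : Int) (out : Int) : Prop := out = solution_alt A X
instance (A : List Int) (X : Int) (out : Int) : Decidable (Spec_solution A X out) := by unfold Spec_solution; infer_instance

-- ===== CLAIM (what is proved, stated in full; the proofs are below) =====
def Claim_equal_solution : Prop := ∀ (A : List Int) (X : Int), Dom_solution A X → Spec_solution A X (solution A X)

-- ===== LEMMAS AND PROOFS =====

-- proof-side helpers: predicates, the pure pair count, the accumulator-free run scan,
-- and the index window of the two-pointer loop
def pvQb (A : List Int) (X : Int) (k : Int) : Bool := decide (4 ≤ A.count k) && decide (k * k ≥ X)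
def pvPb (A : List Int) (k : Int) : Bool := decide (2 ≤ A.count k)

def pvPl (X : Int) (av : List Int) : Int :=
  if _h : 2 ≤ av.length then
    if PySem.List.pyGetD av 0 0 * PySem.List.pyGetD av (-1) 0 ≥ X then
      ((av.length : Int) - 1) + pvPl X av.dropLast
    else pvPl X av.tail
  else 0
termination_by av.length
decreasing_by all_goals simp [List.length_dropLast, List.length_tail]; omega

def pvRuns (X : Int) : List Int → Int × List Int
  | [] => (0, [])
  | x :: rest =>
    let c : Nat := (rest.takeWhile (fun y => y == x)).length + 1
    let p := pvRuns X (rest.dropWhile (fun y => y == x))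
    if 2 ≤ c then
      if 4 ≤ c ∧ x * x ≥ X then (p.1 + 1, x :: p.2) else (p.1, x :: p.2)
    else p
termination_by S => S.length
decreasing_by all_goals
  have := List.length_dropWhile_le (fun y => y == x) rest
  simp only [List.length_cons]
  omega

def pvSub (av : List Int) (l r : Int) : List Int := (av.drop l.toNat).take (r - l + 1).toNat

lemma pvFoldA  (A : List Int) (X : Int) : ∀ (ks : List Int) (s0 : Int) (l0 : List Int),
    (ks.map (fun k => (k, (A.count k : Int)))).foldl (pvStepA X) (s0, l0)
      = (s0 + (ks.countP (pvQb A X) : Int), l0 ++ ks.filter (pvPb A)) := by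
  intro ks
  induction ks with
  | nil => intro s0 l0; simp
  | cons k ks ih =>
    intro s0 l0
    simp only [List.map_cons, List.foldl_cons, List.countP_cons, List.filter_cons]
    by_cases h4 : 4 ≤ A.count k
    · have h4' : ((A.count k : Int) ≥ 4) := by exact_mod_cast h4
      by_cases hx : k * k ≥ X
      · rw [show pvStepA X (s0, l0) (k, (A.count k : Int)) = (s0 + 1, l0 ++ [k]) by
          simp [pvStepA, h4', hx]]
        rw [ih]
        have hq : pvQb A X k = true := by simp [pvQb, h4, hx]
        have hp : pvPb A k = true := by simp [pvPb]; omega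
        simp [hq, hp, List.append_assoc]
        omega
      · rw [show pvStepA X (s0, l0) (k, (A.count k : Int)) = (s0, l0 ++ [k]) by
          simp [pvStepA, h4', hx]]
        rw [ih]
        have hq : pvQb A X k = false := by simp [pvQb, hx]
        have hp : pvPb A k = true := by simp [pvPb]; omega
        simp [hq, hp, List.append_assoc]
    · have h4' : ¬((A.count k : Int) ≥ 4) := by exact_mod_cast h4
      by_cases h2 : 2 ≤ A.count k
      · have h2' : ((A.count k : Int) ≥ 2) := by exact_mod_cast h2
        rw [show pvStepA X (s0, l0) (k, (A.count k : Int)) = (s0, l0 ++ [k]) by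
          simp [pvStepA, h4', h2']]
        rw [ih]
        have hq : pvQb A X k = false := by simp [pvQb]; omega
        have hp : pvPb A k = true := by simp [pvPb]; omega
        simp [hq, hp, List.append_assoc]
      · have h2' : ¬((A.count k : Int) ≥ 2) := by exact_mod_cast h2
        rw [show pvStepA X (s0, l0) (k, (A.count k : Int)) = (s0, l0) by
          simp [pvStepA, h4', h2']]
        rw [ih]
        have hq : pvQb A X k = false := by simp [pvQb]; omega
        have hp : pvPb A k = false := by simp [pvPb]; omega
        simp [hq, hp]

lemma pvPl_short  (X : Int) (av : List Int) (h : av.length < 2) : pvPl X av = 0 := by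
  rw [pvPl]; rw [dif_neg (by omega)]

lemma pvPl_nonneg  (X : Int) : ∀ (n : Nat) (av : List Int), av.length ≤ n → 0 ≤ pvPl X av := by
  intro n
  induction n with
  | zero => intro av h; rw [pvPl_short X av (by omega)]
  | succ n ih =>
    intro av h
    rw [pvPl]
    split_ifs with h2 hp
    · have := ih av.dropLast (by simp [List.length_dropLast]; omega)
      have hlen : (2:Int) ≤ (av.length : Int) := by exact_mod_cast h2
      omega
    · exact ih av.tail (by simp [List.length_tail]; omega)
    · omega

lemma pvPl_len2  (X : Int) (av : List Int) (h : pvPl X av ≠ 0) : 2 ≤ av.length := by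
  by_contra hc
  exact h (pvPl_short X av (by omega))

lemma pvPairLoop_eq  (X : Int) : ∀ (n : Nat) (av : List Int), av.length ≤ n →
    ∀ t, pvPairLoop X t av = t + pvPl X av := by
  intro n
  induction n with
  | zero =>
    intro av h t
    rw [pvPairLoop, pvPl]
    rw [dif_neg (by omega), dif_neg (by omega)]
    omega
  | succ n ih =>
    intro av h t
    rw [pvPairLoop, pvPl]
    split_ifs with h2 hp
    · rw [ih av.dropLast (by simp [List.length_dropLast]; omega)]
      ring
    · rw [ih av.tail (by simp [List.length_tail]; omega)]
    · omega

lemma pvSub_length  (av : List Int) (l r : Int) (h0 : 0 ≤ l) (hr : r < av.length) (hlr : l ≤ r) :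
    (pvSub av l r).length = (r - l + 1).toNat := by
  unfold pvSub
  simp [List.length_take, List.length_drop]
  omega

lemma pvSub_len_le  (av : List Int) (l r : Int) : (pvSub av l r).length ≤ (r - l + 1).toNat := by
  unfold pvSub
  simp [List.length_take]

lemma pvSub_head  (av : List Int) (l r : Int) (h0 : 0 ≤ l) (hr : r < av.length) (hlr : l ≤ r) :
    PySem.List.pyGetD (pvSub av l r) 0 0 = PySem.List.pyGetD av l 0 := by
  have hlen := pvSub_length av l r h0 hr hlr
  rw [PySem.List.pyGetD_eq_getElem _ _ (le_refl 0) (by rw [hlen]; omega)]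
  rw [PySem.List.pyGetD_eq_getElem _ _ h0 (by omega)]
  unfold pvSub
  rw [List.getElem_take, List.getElem_drop]
  simp

lemma pyGetD_neg_one  (xs : List Int) (d : Int) (h : 1 ≤ xs.length) :
    PySem.List.pyGetD xs (-1) d = (xs[xs.length - 1]?).getD d := by
  simp [PySem.List.pyGetD, PySem.List.pyGet?, PySem.List.pyIdx?]
  rw [if_pos h]
  simp

lemma pvSub_last  (av : List Int) (l r : Int) (h0 : 0 ≤ l) (hr : r < av.length) (hlr : l ≤ r) :
    PySem.List.pyGetD (pvSub av l r) (-1) 0 = PySem.List.pyGetD av r 0 := by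
  have hlen := pvSub_length av l r h0 hr hlr
  rw [pyGetD_neg_one _ _ (by omega), hlen]
  rw [PySem.List.pyGetD_of_nonneg _ _ (by omega), List.getD_eq_getElem?_getD]
  unfold pvSub
  rw [List.getElem?_take, if_pos (by omega), List.getElem?_drop]
  have : l.toNat + ((r - l + 1).toNat - 1) = r.toNat := by omega
  rw [this]

lemma pvSub_dropLast  (av : List Int) (l r : Int) (h0 : 0 ≤ l) (hr : r < av.length) (hlr : l ≤ r) :
    (pvSub av l r).dropLast = pvSub av l (r - 1) := by
  unfold pvSub
  have hD : (r - l + 1).toNat ≤ (av.drop l.toNat).length := by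
    simp [List.length_drop]; omega
  rw [List.dropLast_eq_take, List.length_take, Nat.min_eq_left hD, List.take_take,
    Nat.min_eq_left (by omega)]
  congr 1
  omega

lemma pvSub_tail  (av : List Int) (l r : Int) (h0 : 0 ≤ l) :
    (pvSub av l r).tail = pvSub av (l + 1) r := by
  unfold pvSub
  rw [← List.drop_one, List.drop_take, List.drop_drop]
  congr 1
  · omega
  · congr 1; omega

lemma pvLoopA_eq  (av : List Int) (X : Int) : ∀ (n : Nat) (l r a : Int), (r - l).toNat ≤ n →
    0 ≤ l → r < av.length →
    pvLoopA av X a l r =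
      if a + pvPl X (pvSub av l r) > 10 ^ 9 ∧ l < r then -1
      else a + pvPl X (pvSub av l r) := by
  intro n
  induction n with
  | zero =>
    intro l r a hn h0 hr
    have hlr : ¬ l < r := by omega
    rw [pvLoopA, dif_neg hlr]
    have hs := pvSub_len_le av l r
    rw [pvPl_short X _ (by omega)]
    simp [hlr]
  | succ n ih =>
    intro l r a hn h0 hr
    by_cases hlr : l < r
    · have hsl := pvSub_length av l r h0 hr (by omega)
      have hh := pvSub_head av l r h0 hr (by omega)
      have hl := pvSub_last av l r h0 hr (by omega)
      rw [pvLoopA, dif_pos hlr, pvPl, dif_pos (by rw [hsl]; omega), hh, hl, hsl]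
      by_cases hX : PySem.List.pyGetD av l 0 * PySem.List.pyGetD av r 0 ≥ X
      · rw [if_pos hX, if_pos hX, pvSub_dropLast av l r h0 hr (by omega)]
        have hcast : ((r - l + 1).toNat : Int) - 1 = r - l := by omega
        rw [hcast]
        have hsub' : (pvSub av l (r - 1)).length = (r - l).toNat := by
          rw [pvSub_length av l (r - 1) h0 (by omega) (by omega)]; omega
        have hnn := pvPl_nonneg X (pvSub av l (r - 1)).length _ le_rfl
        by_cases hov : a + (r - l) > 10 ^ 9
        · rw [if_pos hov, if_pos ⟨by omega, hlr⟩]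
        · rw [if_neg hov, ih l (r - 1) (a + (r - l)) (by omega) h0 (by omega)]
          by_cases hT : a + (r - l) + pvPl X (pvSub av l (r - 1)) > 10 ^ 9
          · have h2 : 2 ≤ (pvSub av l (r - 1)).length := pvPl_len2 X _ (by omega)
            rw [if_pos ⟨hT, by omega⟩, if_pos ⟨by omega, hlr⟩]
          · rw [if_neg (by intro hc; exact hT hc.1), if_neg (by intro hc; omega)]
            omega
      · rw [if_neg hX, if_neg hX, pvSub_tail av l r h0]
        have hsub' : (pvSub av (l + 1) r).length = (r - l).toNat := by
          rw [pvSub_length av (l + 1) r (by omega) hr (by omega)]; omega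
        have hnn := pvPl_nonneg X (pvSub av (l + 1) r).length _ le_rfl
        by_cases hov : a > 10 ^ 9
        · rw [if_pos hov, if_pos ⟨by omega, hlr⟩]
        · rw [if_neg hov, ih (l + 1) r a (by omega) (by omega) hr]
          by_cases hT : a + pvPl X (pvSub av (l + 1) r) > 10 ^ 9
          · have h2 : 2 ≤ (pvSub av (l + 1) r).length := pvPl_len2 X _ (by omega)
            rw [if_pos ⟨hT, by omega⟩, if_pos ⟨by omega, hlr⟩]
          · rw [if_neg (by intro hc; exact hT hc.1), if_neg (by intro hc; omega)]
    · rw [pvLoopA, dif_neg hlr]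
      have hs := pvSub_len_le av l r
      rw [pvPl_short X _ (by omega)]
      simp [hlr]

lemma pvRunFacts  (x : Int) : ∀ (rest : List Int), (∀ y ∈ rest, x ≤ y) → rest.Pairwise (· ≤ ·) →
    (rest.takeWhile (fun y => y == x)).length = rest.count x ∧
    (∀ y ∈ rest.dropWhile (fun y => y == x), x < y) := by
  intro rest
  induction rest with
  | nil => simp
  | cons z rs ih =>
    intro hle hp
    rw [List.pairwise_cons] at hp
    by_cases hz : z = x
    · subst hz
      rw [List.takeWhile_cons, List.dropWhile_cons]
      simp only [BEq.rfl, if_pos]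
      have := ih (fun y hy => hp.1 y hy) hp.2
      simp only [List.length_cons, List.count_cons_self]
      constructor
      · omega
      · exact this.2
    · have hxz : x < z := lt_of_le_of_ne (hle z (by simp)) (fun h => hz h.symm)
      rw [List.takeWhile_cons, List.dropWhile_cons]
      rw [if_neg (by simp [hz]), if_neg (by simp [hz])]
      constructor
      · simp only [List.length_nil]
        rw [List.count_cons_of_ne (by omega)]
        symm
        rw [List.count_eq_zero]
        intro hmem
        have := hp.1 x hmem
        omega
      · intro y hy
        rcases List.mem_cons.mp hy with h | h
        · omega
        · exact lt_of_lt_of_le hxz (hp.1 y h)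

lemma pvRuns_char  (X : Int) : ∀ (n : Nat) (S : List Int), S.length ≤ n → S.Pairwise (· ≤ ·) →
    (pvRuns X S).2.Pairwise (· < ·) ∧
    (∀ v, v ∈ (pvRuns X S).2 ↔ 2 ≤ S.count v) ∧
    (pvRuns X S).1 = ((pvRuns X S).2.countP
      (fun k => decide (4 ≤ S.count k) && decide (k * k ≥ X)) : Int) := by
  intro n
  induction n with
  | zero =>
    intro S h _
    have : S = [] := List.eq_nil_of_length_eq_zero (by omega)
    subst this
    simp [pvRuns]
  | succ n ih =>
    intro S hlen hp
    match S with
    | [] => simp [pvRuns]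
    | x :: rest =>
      rw [List.pairwise_cons] at hp
      have facts := pvRunFacts x rest hp.1 hp.2
      set t := rest.takeWhile (fun y => y == x) with ht
      set d := rest.dropWhile (fun y => y == x) with hd
      have hdlen : d.length ≤ n := by
        have h1 : d.length ≤ rest.length := hd ▸ List.length_dropWhile_le (fun y => y == x) rest
        simp only [List.length_cons] at hlen
        omega
      have hdsort : d.Pairwise (· ≤ ·) := List.Pairwise.sublist (hd ▸ List.dropWhile_sublist _) hp.2
      have IH := ih d hdlen hdsort
      have hxd : ∀ y ∈ d, x < y := facts.2
      have hxnd : x ∉ d := fun h => lt_irrefl x (hxd x h)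
      have hcx : (x :: rest).count x = t.length + 1 := by
        rw [List.count_cons_self]
        omega
      have hcv : ∀ v : Int, v ≠ x → (x :: rest).count v = d.count v := by
        intro v hv
        rw [List.count_cons_of_ne (Ne.symm hv)]
        conv_lhs => rw [← List.takeWhile_append_dropWhile (p := fun y => y == x) (l := rest)]
        rw [List.count_append]
        have h0 : t.count v = 0 := by
          rw [List.count_eq_zero]
          intro hm
          have := List.mem_takeWhile_imp hm
          simp at this
          exact hv this
        rw [← ht, ← hd, h0, Nat.zero_add]
      have hmemd : ∀ v ∈ (pvRuns X d).2, v ∈ d := by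
        intro v hv
        have := (IH.2.1 v).mp hv
        exact List.count_pos_iff.mp (by omega)
      have hcongr : (pvRuns X d).2.countP
            (fun k => decide (4 ≤ (x :: rest).count k) && decide (k * k ≥ X))
          = (pvRuns X d).2.countP
            (fun k => decide (4 ≤ d.count k) && decide (k * k ≥ X)) := by
        apply List.countP_congr
        intro k hk
        have hkd := hmemd k hk
        have hkx : k ≠ x := fun he => hxnd (he ▸ hkd)
        rw [hcv k hkx]
      have hrw : pvRuns X (x :: rest) =
          (if 2 ≤ t.length + 1 then
            if 4 ≤ t.length + 1 ∧ x * x ≥ X then ((pvRuns X d).1 + 1, x :: (pvRuns X d).2)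
            else ((pvRuns X d).1, x :: (pvRuns X d).2)
          else pvRuns X d) := by
        rw [pvRuns]
      rw [hrw]
      by_cases hc2 : 2 ≤ t.length + 1
      · rw [if_pos hc2]
        have hmem : ∀ v, (v ∈ x :: (pvRuns X d).2 ↔ 2 ≤ (x :: rest).count v) := by
          intro v
          by_cases hv : v = x
          · subst hv
            simp [hcx]
            omega
          · rw [hcv v hv]
            simp only [List.mem_cons]
            constructor
            · rintro (h | h)
              · exact absurd h hv
              · exact (IH.2.1 v).mp h
            · intro h
              exact Or.inr ((IH.2.1 v).mpr h)
        have hpw : (x :: (pvRuns X d).2).Pairwise (· < ·) := by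
          rw [List.pairwise_cons]
          exact ⟨fun v hv => hxd v (hmemd v hv), IH.1⟩
        by_cases hc4 : 4 ≤ t.length + 1 ∧ x * x ≥ X
        · rw [if_pos hc4]
          refine ⟨hpw, hmem, ?_⟩
          rw [List.countP_cons]
          have hpx : (decide (4 ≤ (x :: rest).count x) && decide (x * x ≥ X)) = true := by
            rw [hcx]
            simp [hc4.1, hc4.2]
          rw [hpx, hcongr]
          simp only [if_true]
          push_cast
          rw [IH.2.2]
        · rw [if_neg hc4]
          refine ⟨hpw, hmem, ?_⟩
          rw [List.countP_cons]
          have hpx : (decide (4 ≤ (x :: rest).count x) && decide (x * x ≥ X)) = false := by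
            rw [hcx]
            by_cases h4 : 4 ≤ t.length + 1
            · have hxx : ¬ (x * x ≥ X) := fun hxx => hc4 ⟨h4, hxx⟩
              simp [h4, hxx]
            · simp [h4]
          rw [hpx, hcongr]
          simp only [Bool.false_eq_true, if_false, Nat.add_zero]
          exact IH.2.2
      · rw [if_neg hc2]
        have hmem : ∀ v, (v ∈ (pvRuns X d).2 ↔ 2 ≤ (x :: rest).count v) := by
          intro v
          by_cases hv : v = x
          · subst hv
            constructor
            · intro h
              exact absurd (hmemd v h) hxnd
            · intro h
              rw [hcx] at h
              omega
          · rw [hcv v hv]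
            exact IH.2.1 v
        exact ⟨IH.1, hmem, by rw [hcongr]; exact IH.2.2⟩

lemma pvScanRuns_eq  (X : Int) : ∀ (n : Nat) (S : List Int), S.length ≤ n →
    ∀ (sq : Int) (av : List Int),
    pvScanRuns X sq av S = (sq + (pvRuns X S).1, av ++ (pvRuns X S).2) := by
  intro n
  induction n with
  | zero =>
    intro S h sq av
    have : S = [] := List.eq_nil_of_length_eq_zero (by omega)
    subst this
    simp [pvScanRuns, pvRuns]
  | succ n ih =>
    intro S hlen sq av
    match S with
    | [] => simp [pvScanRuns, pvRuns]
    | x :: rest =>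
      have hdlen : (rest.dropWhile (fun y => y == x)).length ≤ n := by
        have h1 := List.length_dropWhile_le (fun y => y == x) rest
        simp only [List.length_cons] at hlen
        omega
      rw [pvScanRuns, pvRuns]
      by_cases hc2 : 2 ≤ (rest.takeWhile (fun y => y == x)).length + 1
      · rw [if_pos hc2, if_pos hc2]
        by_cases hc4 : 4 ≤ (rest.takeWhile (fun y => y == x)).length + 1 ∧ x * x ≥ X
        · rw [if_pos hc4, if_pos hc4, ih _ hdlen]
          simp only [Prod.mk.injEq]
          constructor
          · ring
          · simp
        · rw [if_neg hc4, if_neg hc4, ih _ hdlen]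
          simp
      · rw [if_neg hc2, if_neg hc2, ih _ hdlen]

-- ===== VERDICT (by name: the statement is the Claim_ definition above) =====
theorem solution_spec : Claim_equal_solution := by
  intro A X _hD
  unfold Spec_solution solution solution_alt
  rw [PySem.Dict.items_counter, pvFoldA A X (PySem.Set.ofList A) 0 []]
  dsimp only
  rw [pvScanRuns_eq X (PySem.List.sorted A id).length _ le_rfl 0 []]
  simp only [zero_add, List.nil_append]
  -- facts about the sorted copy of A
  have hperm : (PySem.List.sorted A id).Perm A := PySem.List.sorted_perm A id false
  have hsort : (PySem.List.sorted A id).Pairwise (· ≤ ·) := by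
    have := PySem.List.sorted_pairwise A id
    simpa using this
  have hcount : ∀ v : Int, List.count v (PySem.List.sorted A id) = List.count v A :=
    fun v => hperm.count_eq v
  have hchar := pvRuns_char X (PySem.List.sorted A id).length _ le_rfl hsort
  set runs := pvRuns X (PySem.List.sorted A id) with hruns
  -- the two available lists are equal
  have hmemB : ∀ v : Int, v ∈ runs.2 ↔ 2 ≤ List.count v A := by
    intro v
    rw [hchar.2.1 v, hcount v]
  have hnodupB : runs.2.Nodup := List.Pairwise.imp (fun h => ne_of_lt h) hchar.1
  have hnodupA : ((PySem.Set.ofList A).filter (pvPb A)).Nodup :=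
    (PySem.Set.nodup_ofList A).filter _
  have hmemA : ∀ v : Int, v ∈ (PySem.Set.ofList A).filter (pvPb A) ↔ 2 ≤ List.count v A := by
    intro v
    rw [List.mem_filter, PySem.Set.mem_ofList]
    simp only [pvPb, decide_eq_true_eq]
    constructor
    · exact fun h => h.2
    · exact fun h => ⟨List.count_pos_iff.mp (by omega), h⟩
  have hpermAB : runs.2.Perm ((PySem.Set.ofList A).filter (pvPb A)) :=
    (List.perm_ext_iff_of_nodup hnodupB hnodupA).2 (fun v => by rw [hmemB, hmemA])
  have hsortEq : PySem.List.sorted ((PySem.Set.ofList A).filter (pvPb A)) id = runs.2 :=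
    PySem.List.sorted_eq_of_perm_of_pairwise_lt _ _ id hpermAB (by simpa using hchar.1)
  rw [hsortEq]
  -- the two square counts are equal
  have hsq : ((PySem.Set.ofList A).countP (pvQb A X) : Int) = runs.1 := by
    rw [hchar.2.2]
    congr 1
    have h1 : runs.2.countP
          (fun k => decide (4 ≤ List.count k (PySem.List.sorted A id)) && decide (k * k ≥ X))
        = runs.2.countP (pvQb A X) :=
      List.countP_congr (fun k _ => by simp [pvQb, hcount k])
    have h2 : runs.2.countP (pvQb A X)
        = ((PySem.Set.ofList A).filter (pvPb A)).countP (pvQb A X) :=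
      hpermAB.countP_eq (pvQb A X)
    have h3 : ((PySem.Set.ofList A).filter (pvPb A)).countP (pvQb A X)
        = (PySem.Set.ofList A).countP (pvQb A X) := by
      rw [List.countP_filter]
      apply List.countP_congr
      intro k _
      simp only [pvQb, pvPb, Bool.and_assoc, Bool.and_eq_true, decide_eq_true_eq]
      omega
    rw [h1, h2, h3]
  rw [hsq]
  -- both loops compute runs.1 + pvPl X runs.2
  rw [pvPairLoop_eq X runs.2.length runs.2 le_rfl runs.1]
  rw [pvLoopA_eq runs.2 X (((runs.2.length : Int) - 1) - 0).toNat 0 ((runs.2.length : Int) - 1)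
    runs.1 le_rfl (le_refl 0) (by omega)]
  have hsub : pvSub runs.2 0 ((runs.2.length : Int) - 1) = runs.2 := by
    unfold pvSub
    simp
  rw [hsub]
  by_cases hlen2 : (0 : Int) < (runs.2.length : Int) - 1
  · have h1 : (1 : Nat) < runs.2.length := by omega
    simp [h1]
  · have h0 : pvPl X runs.2 = 0 := pvPl_short X _ (by omega)
    have hb : runs.2.countP
        (fun k => decide (4 ≤ List.count k (PySem.List.sorted A id)) && decide (k * k ≥ X))
        ≤ runs.2.length := List.countP_le_length
    have hr1 : runs.1 ≤ 1 := by
      rw [hchar.2.2]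
      omega
    rw [h0]
    rw [if_neg (by omega), if_neg (by omega)]
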